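-- pv_equiv track=rewrite | github.com/produk-if/Klasifikasi_Mahasiswa_Berprestasi | src/evaluation/evaluation_framework.py | _identify_feature_groups
-- ===== SOURCE A (Python) =====
-- from typing import Dict, List, Tuple, Any, Optional
--
-- def _identify_feature_groups(feature_names: List[str]) -> Dict[str, List[str]]:
--     """Identify feature groups for analysis."""
--     groups = {
--         'academic': [],
--         'achievement': [],
--         'organizational': [],
--         'composite': [],
--         'demographic': []
--     }
--
--     for feature in feature_names:
--         if any(x in feature.lower() for x in ['ipk', 'sks', 'ips', 'semester', 'academic']):
--             groups['academic'].append(feature)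
--         elif any(x in feature.lower() for x in ['prestasi', 'achievement', 'international', 'national']):
--             groups['achievement'].append(feature)
--         elif any(x in feature.lower() for x in ['org', 'leadership', 'professional', 'religious', 'social']):
--             groups['organizational'].append(feature)
--         elif any(x in feature.lower() for x in ['weighted', 'composite', 'score']):
--             groups['composite'].append(feature)
--         elif any(x in feature.lower() for x in ['gender', 'program', 'entry_year', 'nim']):
--             groups['demographic'].append(feature)
--
--     return groups
-- ===== SOURCE B (Python) =====
-- from typing import Dict, List
--
-- _GROUP_TABLE = [
--     ('academic', ['ipk', 'sks', 'ips', 'semester', 'academic']),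
--     ('achievement', ['prestasi', 'achievement', 'international', 'national']),
--     ('organizational', ['org', 'leadership', 'professional', 'religious', 'social']),
--     ('composite', ['weighted', 'composite', 'score']),
--     ('demographic', ['gender', 'program', 'entry_year', 'nim']),
-- ]
--
-- def _identify_feature_groups(feature_names: List[str]) -> Dict[str, List[str]]:
--     """Identify feature groups for analysis (group-major staged partition)."""
--     groups: Dict[str, List[str]] = {}
--     remaining = list(feature_names)
--     for name, kws in _GROUP_TABLE:
--         matched: List[str] = []
--         rest: List[str] = []
--         for f in remaining:
--             (matched if any(k in f.lower() for k in kws) else rest).append(f)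
--         groups[name] = matched
--         remaining = rest
--     return groups
-- ===== Notes on version B (the rewrite author's own statement) =====
-- stated objective: alternative
-- what changed: Swaps the loop nesting: instead of A's feature-major pass with a five-way if/elif dispatch into a mutated dict, B iterates group-major over a (group, keywords) table, each pass stably partitioning the remaining features into that group's list and a shrinking remainder, so priority is enforced by removal rather than branch order.
import Mathlib
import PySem

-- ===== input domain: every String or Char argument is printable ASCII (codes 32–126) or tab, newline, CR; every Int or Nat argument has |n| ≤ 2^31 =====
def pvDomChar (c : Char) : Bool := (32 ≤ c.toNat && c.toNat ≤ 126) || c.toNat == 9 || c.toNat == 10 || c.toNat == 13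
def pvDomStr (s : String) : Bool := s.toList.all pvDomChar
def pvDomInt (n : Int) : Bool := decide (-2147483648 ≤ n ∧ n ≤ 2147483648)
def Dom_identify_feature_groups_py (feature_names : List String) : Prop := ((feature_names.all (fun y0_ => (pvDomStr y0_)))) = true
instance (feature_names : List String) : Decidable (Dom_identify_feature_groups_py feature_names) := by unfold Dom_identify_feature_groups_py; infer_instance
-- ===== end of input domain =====

-- B swaps the loop nesting: instead of A's feature-major if/elif dispatch into a mutated dict,
-- it iterates group-major over a (group, keywords) table, each pass stably partitioning the
-- remaining features and shrinking the remainder; same results, alternative decomposition.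

-- ===== PORT A =====
-- A's loop body: the if/elif chain appending the feature to the first matching group.
def stepA (g : PySem.Dict String (List String)) (feature : String) : PySem.Dict String (List String) :=
  if (["ipk", "sks", "ips", "semester", "academic"].any
        (fun x => PySem.Str.isIn x (PySem.Str.lower feature))) then
    g.modify "academic" [] (fun l => l ++ [feature])
  else if (["prestasi", "achievement", "international", "national"].any
        (fun x => PySem.Str.isIn x (PySem.Str.lower feature))) then
    g.modify "achievement" [] (fun l => l ++ [feature])
  else if (["org", "leadership", "professional", "religious", "social"].any
        (fun x => PySem.Str.isIn x (PySem.Str.lower feature))) then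
    g.modify "organizational" [] (fun l => l ++ [feature])
  else if (["weighted", "composite", "score"].any
        (fun x => PySem.Str.isIn x (PySem.Str.lower feature))) then
    g.modify "composite" [] (fun l => l ++ [feature])
  else if (["gender", "program", "entry_year", "nim"].any
        (fun x => PySem.Str.isIn x (PySem.Str.lower feature))) then
    g.modify "demographic" [] (fun l => l ++ [feature])
  else g

def identify_feature_groups_py (feature_names : List String) : List (String × List String) :=
  let groups : PySem.Dict String (List String) :=
    PySem.Dict.ofList [("academic", []), ("achievement", []), ("organizational", []),
                       ("composite", []), ("demographic", [])]
  (feature_names.foldl stepA groups).items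

-- ===== PORT B =====
def pvGroupTable : List (String × List String) :=
  [("academic", ["ipk", "sks", "ips", "semester", "academic"]),
   ("achievement", ["prestasi", "achievement", "international", "national"]),
   ("organizational", ["org", "leadership", "professional", "religious", "social"]),
   ("composite", ["weighted", "composite", "score"]),
   ("demographic", ["gender", "program", "entry_year", "nim"])]

-- Source B's inner loop: one stable pass splitting `remaining` into (matched, rest).
def pvPart (kws : List String) (remaining : List String) : List String × List String :=
  remaining.foldl
    (fun mr f =>
      if kws.any (fun k => PySem.Str.isIn k (PySem.Str.lower f)) then (mr.1 ++ [f], mr.2)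
      else (mr.1, mr.2 ++ [f]))
    ([], [])

-- Source B's outer loop over the table, threading (groups built so far, remaining features).
def identify_feature_groups_py_alt (feature_names : List String) : List (String × List String) :=
  (pvGroupTable.foldl
    (fun st p =>
      let pr := pvPart p.2 st.2
      (st.1 ++ [(p.1, pr.1)], pr.2))
    ([], feature_names)).1

-- ===== PRECONDITION & SPEC =====
def Spec_identify_feature_groups_py (feature_names : List String) (out : List (String × List String)) : Prop := out = identify_feature_groups_py_alt feature_names
instance (feature_names : List String) (out : List (String × List String)) : Decidable (Spec_identify_feature_groups_py feature_names out) := by unfold Spec_identify_feature_groups_py; infer_instance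

-- ===== CLAIM (what is proved, stated in full; the proofs are below) =====
def Claim_equal_identify_feature_groups_py : Prop := ∀ (feature_names : List String), Dom_identify_feature_groups_py feature_names → Spec_identify_feature_groups_py feature_names (identify_feature_groups_py feature_names)

-- ===== LEMMAS AND PROOFS =====
set_option maxHeartbeats 1000000

-- abbreviations for A's five branch conditions (proof-side only)
def c1 (f : String) : Bool := ["ipk", "sks", "ips", "semester", "academic"].any (fun x => PySem.Str.isIn x (PySem.Str.lower f))
def c2 (f : String) : Bool := ["prestasi", "achievement", "international", "national"].any (fun x => PySem.Str.isIn x (PySem.Str.lower f))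
def c3 (f : String) : Bool := ["org", "leadership", "professional", "religious", "social"].any (fun x => PySem.Str.isIn x (PySem.Str.lower f))
def c4 (f : String) : Bool := ["weighted", "composite", "score"].any (fun x => PySem.Str.isIn x (PySem.Str.lower f))
def c5 (f : String) : Bool := ["gender", "program", "entry_year", "nim"].any (fun x => PySem.Str.isIn x (PySem.Str.lower f))

theorem stepA_eq (g : PySem.Dict String (List String)) (f : String) :
    stepA g f =
      if c1 f then g.modify "academic" [] (fun l => l ++ [f])
      else if c2 f then g.modify "achievement" [] (fun l => l ++ [f])
      else if c3 f then g.modify "organizational" [] (fun l => l ++ [f])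
      else if c4 f then g.modify "composite" [] (fun l => l ++ [f])
      else if c5 f then g.modify "demographic" [] (fun l => l ++ [f])
      else g := rfl

theorem mod1 (l1 l2 l3 l4 l5 : List String) (v : String) :
    (PySem.Dict.mk [("academic", l1), ("achievement", l2), ("organizational", l3),
        ("composite", l4), ("demographic", l5)]).modify "academic" [] (fun l => l ++ [v]) =
    PySem.Dict.mk [("academic", l1 ++ [v]), ("achievement", l2), ("organizational", l3),
        ("composite", l4), ("demographic", l5)] := by
  rfl

theorem mod2 (l1 l2 l3 l4 l5 : List String) (v : String) :
    (PySem.Dict.mk [("academic", l1), ("achievement", l2), ("organizational", l3),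
        ("composite", l4), ("demographic", l5)]).modify "achievement" [] (fun l => l ++ [v]) =
    PySem.Dict.mk [("academic", l1), ("achievement", l2 ++ [v]), ("organizational", l3),
        ("composite", l4), ("demographic", l5)] := by
  rfl

theorem mod3 (l1 l2 l3 l4 l5 : List String) (v : String) :
    (PySem.Dict.mk [("academic", l1), ("achievement", l2), ("organizational", l3),
        ("composite", l4), ("demographic", l5)]).modify "organizational" [] (fun l => l ++ [v]) =
    PySem.Dict.mk [("academic", l1), ("achievement", l2), ("organizational", l3 ++ [v]),
        ("composite", l4), ("demographic", l5)] := by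
  rfl

theorem mod4 (l1 l2 l3 l4 l5 : List String) (v : String) :
    (PySem.Dict.mk [("academic", l1), ("achievement", l2), ("organizational", l3),
        ("composite", l4), ("demographic", l5)]).modify "composite" [] (fun l => l ++ [v]) =
    PySem.Dict.mk [("academic", l1), ("achievement", l2), ("organizational", l3),
        ("composite", l4 ++ [v]), ("demographic", l5)] := by
  rfl

theorem mod5 (l1 l2 l3 l4 l5 : List String) (v : String) :
    (PySem.Dict.mk [("academic", l1), ("achievement", l2), ("organizational", l3),
        ("composite", l4), ("demographic", l5)]).modify "demographic" [] (fun l => l ++ [v]) =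
    PySem.Dict.mk [("academic", l1), ("achievement", l2), ("organizational", l3),
        ("composite", l4), ("demographic", l5 ++ [v])] := by
  rfl

-- A's loop, started from any five accumulated lists, appends to each group exactly the
-- features matching that group's keywords and none of the earlier groups'.
theorem loop_items (fs : List String) : ∀ (l1 l2 l3 l4 l5 : List String),
    (fs.foldl stepA (PySem.Dict.mk [("academic", l1), ("achievement", l2),
        ("organizational", l3), ("composite", l4), ("demographic", l5)])).items =
    [("academic", l1 ++ fs.filter (fun f => c1 f)),
     ("achievement", l2 ++ fs.filter (fun f => !c1 f && c2 f)),
     ("organizational", l3 ++ fs.filter (fun f => !c1 f && !c2 f && c3 f)),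
     ("composite", l4 ++ fs.filter (fun f => !c1 f && !c2 f && !c3 f && c4 f)),
     ("demographic", l5 ++ fs.filter (fun f => !c1 f && !c2 f && !c3 f && !c4 f && c5 f))] := by
  induction fs with
  | nil => intro l1 l2 l3 l4 l5; simp
  | cons f fs ih =>
    intro l1 l2 l3 l4 l5
    rw [List.foldl_cons, stepA_eq]
    split_ifs with h1 h2 h3 h4 h5
    · rw [mod1, ih]; simp [h1]
    · rw [mod2, ih]; simp [h1, h2]
    · rw [mod3, ih]; simp [h1, h2, h3]
    · rw [mod4, ih]; simp [h1, h2, h3, h4]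
    · rw [mod5, ih]; simp [h1, h2, h3, h4, h5]
    · rw [ih]; simp [h1, h2, h3, h4, h5]

-- B's single partition pass computes the filter and its complement, in order.
theorem pvPart_aux (p : String → Bool) (fs : List String) : ∀ (m r : List String),
    fs.foldl (fun mr f => if p f then (mr.1 ++ [f], mr.2) else (mr.1, mr.2 ++ [f])) (m, r) =
    (m ++ fs.filter p, r ++ fs.filter (fun f => !p f)) := by
  induction fs with
  | nil => intro m r; simp
  | cons f fs ih =>
    intro m r
    rw [List.foldl_cons]
    by_cases h : p f = true
    · rw [if_pos h, ih, List.filter_cons_of_pos h, List.filter_cons_of_neg (by simp [h])]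
      simp
    · rw [if_neg h, ih, List.filter_cons_of_neg h,
        List.filter_cons_of_pos (by simp [Bool.not_eq_true] at h ⊢; exact h)]
      simp

theorem pvPart_eq (kws : List String) (fs : List String) :
    pvPart kws fs =
    (fs.filter (fun f => kws.any (fun k => PySem.Str.isIn k (PySem.Str.lower f))),
     fs.filter (fun f => !kws.any (fun k => PySem.Str.isIn k (PySem.Str.lower f)))) := by
  unfold pvPart
  rw [pvPart_aux (fun f => kws.any (fun k => PySem.Str.isIn k (PySem.Str.lower f))) fs [] []]
  simp

-- B's staged fold over the five-entry table, with each partition pass rewritten.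
theorem altB (fs : List String) :
    identify_feature_groups_py_alt fs =
    [("academic", fs.filter (fun f => c1 f)),
     ("achievement", (fs.filter (fun f => !c1 f)).filter (fun f => c2 f)),
     ("organizational", ((fs.filter (fun f => !c1 f)).filter (fun f => !c2 f)).filter (fun f => c3 f)),
     ("composite", (((fs.filter (fun f => !c1 f)).filter (fun f => !c2 f)).filter (fun f => !c3 f)).filter (fun f => c4 f)),
     ("demographic", ((((fs.filter (fun f => !c1 f)).filter (fun f => !c2 f)).filter (fun f => !c3 f)).filter (fun f => !c4 f)).filter (fun f => c5 f))] := by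
  unfold identify_feature_groups_py_alt pvGroupTable
  simp only [List.foldl_cons, List.foldl_nil, pvPart_eq]
  rfl

theorem filt2 (fs : List String) :
    (fs.filter (fun f => !c1 f)).filter (fun f => c2 f) =
    fs.filter (fun f => !c1 f && c2 f) := by
  rw [List.filter_filter]
  exact List.filter_congr (by intro a _; cases c1 a <;> cases c2 a <;> rfl)

theorem filt3 (fs : List String) :
    ((fs.filter (fun f => !c1 f)).filter (fun f => !c2 f)).filter (fun f => c3 f) =
    fs.filter (fun f => !c1 f && !c2 f && c3 f) := by
  rw [List.filter_filter, List.filter_filter]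
  exact List.filter_congr (by intro a _; cases c1 a <;> cases c2 a <;> cases c3 a <;> rfl)

theorem filt4 (fs : List String) :
    (((fs.filter (fun f => !c1 f)).filter (fun f => !c2 f)).filter (fun f => !c3 f)).filter (fun f => c4 f) =
    fs.filter (fun f => !c1 f && !c2 f && !c3 f && c4 f) := by
  rw [List.filter_filter, List.filter_filter, List.filter_filter]
  exact List.filter_congr (by intro a _; cases c1 a <;> cases c2 a <;> cases c3 a <;> cases c4 a <;> rfl)

theorem filt5 (fs : List String) :
    ((((fs.filter (fun f => !c1 f)).filter (fun f => !c2 f)).filter (fun f => !c3 f)).filter (fun f => !c4 f)).filter (fun f => c5 f) =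
    fs.filter (fun f => !c1 f && !c2 f && !c3 f && !c4 f && c5 f) := by
  rw [List.filter_filter, List.filter_filter, List.filter_filter, List.filter_filter]
  exact List.filter_congr (by intro a _; cases c1 a <;> cases c2 a <;> cases c3 a <;> cases c4 a <;> cases c5 a <;> rfl)

-- ===== VERDICT (by name: the statement is the Claim_ definition above) =====
theorem identify_feature_groups_py_spec : Claim_equal_identify_feature_groups_py := by
  unfold Claim_equal_identify_feature_groups_py
  intro fs _
  unfold Spec_identify_feature_groups_py identify_feature_groups_py
  rw [show (PySem.Dict.ofList [("academic", ([] : List String)), ("achievement", []),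
        ("organizational", []), ("composite", []), ("demographic", [])] : PySem.Dict String (List String)) =
      PySem.Dict.mk [("academic", []), ("achievement", []), ("organizational", []),
        ("composite", []), ("demographic", [])] from by rfl]
  rw [loop_items, altB, filt2, filt3, filt4, filt5]
  simp
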